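-- pv_equiv track=rewrite | github.com/Scrocisss/Give | bd_project2/game.py | can_form_word
-- ===== SOURCE A (Python) =====
-- def can_form_word(source_word, target_word):
--     if len(target_word) < 3:
--         return False
--     if target_word == source_word.lower():
--         return False
--     from collections import defaultdict
--     source_counts = defaultdict(int)
--     for char in source_word.lower():
--         source_counts[char] += 1
--     for char in target_word.lower():
--         if source_counts[char] <= 0:
--             return False
--         source_counts[char] -= 1
--     return True
-- ===== SOURCE B (Python) =====
-- def can_form_word(source_word, target_word):
--     if len(target_word) < 3:
--         return False
--     if target_word == source_word.lower():
--         return False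
--     # Sort both lowered words; target's letters are available in source iff the
--     # sorted target is a (greedy two-pointer) subsequence of the sorted source.
--     need = sorted(target_word.lower())
--     i = 0
--     for ch in sorted(source_word.lower()):
--         if i < len(need) and need[i] == ch:
--             i += 1
--     return i == len(need)
-- ===== Notes on version B (the rewrite author's own statement) =====
-- stated objective: alternative
-- what changed: The per-character count-decrementing dict scan is replaced by a sort-then-two-pointer merge: both lowered words are sorted and a single greedy scan checks that the sorted target is a subsequence of the sorted source (multiset inclusion via ordering instead of counting).
import Mathlib
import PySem

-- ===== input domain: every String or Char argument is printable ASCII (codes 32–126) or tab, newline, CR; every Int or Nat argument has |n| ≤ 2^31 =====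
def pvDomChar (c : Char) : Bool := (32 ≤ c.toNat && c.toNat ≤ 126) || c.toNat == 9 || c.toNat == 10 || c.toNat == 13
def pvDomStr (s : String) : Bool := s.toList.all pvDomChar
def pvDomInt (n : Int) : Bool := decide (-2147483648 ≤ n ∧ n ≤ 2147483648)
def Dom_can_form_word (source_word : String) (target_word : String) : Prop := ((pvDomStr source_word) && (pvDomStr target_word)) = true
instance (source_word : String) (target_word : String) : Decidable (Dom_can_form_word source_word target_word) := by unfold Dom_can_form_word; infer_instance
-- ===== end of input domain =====

-- B replaces A's decrementing count-dict scan with sort-then-two-pointer: sorted target is checked as a greedy subsequence of sorted source (alternative algorithm, same guards).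


-- ===== PORT A =====
-- the second for-loop of A (early return on a depleted count, else decrement and continue)
def canFormLoop (counts : PySem.Dict Char Int) : List Char → Bool
  | [] => true
  | c :: rest =>
      if counts.getD c 0 ≤ 0 then false
      else canFormLoop (counts.modify c 0 (· - 1)) rest

def can_form_word (source_word : String) (target_word : String) : Bool :=
  if PySem.Str.len target_word < 3 then false
  else if target_word == PySem.Str.lower source_word then false
  else
    -- source_counts = defaultdict(int); for char in source_word.lower(): source_counts[char] += 1
    let source_counts : PySem.Dict Char Int :=
      (PySem.Str.lower source_word).toList.foldl (fun d ch => d.modify ch 0 (· + 1)) PySem.Dict.empty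
    canFormLoop source_counts (PySem.Str.lower target_word).toList

-- ===== PORT B =====
-- Source B's for-loop over the sorted source with the pointer i into `need`,
-- transcribed with `need.drop i` as the remaining-target state:
--   for ch in sorted_source: if i < len(need) and need[i] == ch: i += 1
def scanGreedy : List Char → List Char → Bool
  | t, [] => t.isEmpty
  | [], _ :: s => scanGreedy [] s
  | c :: need', ch :: s => if c == ch then scanGreedy need' s else scanGreedy (c :: need') s
  termination_by _ s => s.length

def can_form_word_alt (source_word : String) (target_word : String) : Bool :=
  if PySem.Str.len target_word < 3 then false
  else if target_word == PySem.Str.lower source_word then false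
  else
    let need := PySem.List.sorted (PySem.Str.lower target_word).toList (fun c => c) false
    let src := PySem.List.sorted (PySem.Str.lower source_word).toList (fun c => c) false
    scanGreedy need src

-- ===== PRECONDITION & SPEC =====
def Spec_can_form_word (source_word : String) (target_word : String) (out : Bool) : Prop := out = can_form_word_alt source_word target_word
instance (source_word : String) (target_word : String) (out : Bool) : Decidable (Spec_can_form_word source_word target_word out) := by unfold Spec_can_form_word; infer_instance

-- ===== CLAIM (what is proved, stated in full; the proofs are below) =====
def Claim_equal_can_form_word : Prop := ∀ (source_word : String) (target_word : String), Dom_can_form_word source_word target_word → Spec_can_form_word source_word target_word (can_form_word source_word target_word)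

-- ===== LEMMAS AND PROOFS =====
-- A's loop succeeds iff every character's remaining count covers its multiplicity in the rest of the target.
theorem canFormLoop_iff (l : List Char) (d : PySem.Dict Char Int)
    (h : ∀ c, 0 ≤ d.getD c 0) :
    canFormLoop d l = true ↔ ∀ c ∈ l, (l.count c : Int) ≤ d.getD c 0 := by
  induction l generalizing d with
  | nil => simp [canFormLoop]
  | cons c rest ih =>
    by_cases hc : d.getD c 0 ≤ 0
    · have hz : d.getD c 0 = 0 := le_antisymm hc (h c)
      simp only [canFormLoop, hc, if_pos]
      constructor
      · intro hfalse; cases hfalse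
      · intro hall
        have := hall c (by simp)
        rw [hz] at this
        simp [List.count_cons_self] at this
        omega
    · have hd' : ∀ x, 0 ≤ (d.modify c 0 (· - 1)).getD x 0 := by
        intro x
        rw [PySem.Dict.getD_modify]
        split_ifs with hx
        · omega
        · exact h x
      rw [show canFormLoop d (c :: rest) = canFormLoop (d.modify c 0 (· - 1)) rest from by simp [canFormLoop, hc]]
      rw [ih _ hd']
      constructor
      · intro hall x hx
        by_cases hxc : x = c
        · subst hxc
          have hcnt : (rest.count x : Int) ≤ d.getD x 0 - 1 := by
            by_cases hm : x ∈ rest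
            · have := hall x hm
              rw [PySem.Dict.getD_modify, if_pos rfl] at this
              omega
            · rw [List.count_eq_zero_of_not_mem hm]
              push_cast
              omega
          simp only [List.count_cons_self]
          push_cast
          omega
        · have hxr : x ∈ rest := by
            rcases List.mem_cons.mp hx with h' | h'
            · exact absurd h' hxc
            · exact h'
          have h1 := hall x hxr
          rw [PySem.Dict.getD_modify, if_neg hxc] at h1
          have hcx : ¬ c = x := fun h => hxc h.symm
          simp [hcx]
          exact h1
      · intro hall x hx
        rw [PySem.Dict.getD_modify]
        by_cases hxc : x = c
        · subst hxc
          have := hall x (List.mem_cons_of_mem _ hx)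
          rw [if_pos rfl]
          simp at this
          omega
        · rw [if_neg hxc]
          have := hall x (List.mem_cons_of_mem _ hx)
          have hcx : ¬ c = x := fun h => hxc h.symm
          simp [hcx] at this
          exact this

-- The greedy two-pointer scan decides the subsequence relation (on any lists).
theorem scanGreedy_iff (s t : List Char) : scanGreedy t s = true ↔ t.Sublist s := by
  induction s generalizing t with
  | nil =>
    cases t <;> simp [scanGreedy]
  | cons ch s ih =>
    cases t with
    | nil => simp [scanGreedy, ih]
    | cons c t' =>
      by_cases hcc : c = ch
      · subst hcc
        rw [show scanGreedy (c :: t') (c :: s) = scanGreedy t' s from by simp [scanGreedy]]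
        rw [ih]
        exact (List.cons_sublist_cons).symm
      · rw [show scanGreedy (c :: t') (ch :: s) = scanGreedy (c :: t') s from by
            simp [scanGreedy, hcc]]
        rw [ih]
        constructor
        · exact fun h => h.cons ch
        · intro h
          rcases List.sublist_cons_iff.mp h with h' | ⟨r, hr, hr'⟩
          · exact h'
          · injection hr with hce _
            exact absurd hce hcc

-- ===== VERDICT (by name: the statement is the Claim_ definition above) =====
theorem can_form_word_spec : Claim_equal_can_form_word := by
  intro s t _
  unfold Spec_can_form_word can_form_word can_form_word_alt
  split_ifs with h1 h2
  · rfl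
  · rfl
  · set sl := (PySem.Str.lower s).toList
    set tl := (PySem.Str.lower t).toList
    rw [← PySem.Dict.counter_eq_foldl]
    rw [Bool.eq_iff_iff]
    rw [canFormLoop_iff _ _ (by intro c; rw [PySem.Dict.getD_counter]; exact Int.natCast_nonneg _)]
    rw [scanGreedy_iff]
    have hsubperm : (∀ c ∈ tl, (tl.count c : Int) ≤ (PySem.Dict.counter sl).getD c 0) ↔ List.Subperm tl sl := by
      constructor
      · intro hall
        rw [List.subperm_ext_iff]
        intro c hc
        have := hall c hc
        rw [PySem.Dict.getD_counter] at this
        exact_mod_cast this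
      · intro hsub c hc
        rw [PySem.Dict.getD_counter]
        exact_mod_cast (List.subperm_ext_iff.mp hsub) c hc
    rw [hsubperm]
    have hpt : (PySem.List.sorted tl (fun c => c) false).Perm tl := PySem.List.sorted_perm ..
    have hps : (PySem.List.sorted sl (fun c => c) false).Perm sl := PySem.List.sorted_perm ..
    constructor
    · intro h
      have h' : List.Subperm (PySem.List.sorted tl (fun c => c) false) (PySem.List.sorted sl (fun c => c) false) :=
        (hpt.subperm.trans h).trans hps.symm.subperm
      exact List.sublist_of_subperm_of_pairwise h'
        (by simpa using PySem.List.sorted_pairwise tl (fun c => c))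
        (by simpa using PySem.List.sorted_pairwise sl (fun c => c))
    · intro h
      exact (hpt.symm.subperm.trans h.subperm).trans hps.subperm
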